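-- pv_equiv track=rewrite | github.com/PeterWolf-tw/ESOE-CS101-2015 | Team08_CodeWar.py | translater
-- ===== SOURCE A (Python) =====
-- def index():
--     fuck = "0123456789ABCDEFGHIJKLMNOPQRSTUVWXYZabcdefghijklmnopqrstuvwxyz"
--     shit = []
--     j = 0
--     for i in fuck:
--         shit.append((i,j))
--         j = j+1
--     return shit
--
-- def translater(inputSTR):
--     yee = index()
--     out = []
--     for i in inputSTR:
--         for j in yee:
--             if i in j :
--                 out.append(j[1])
--
--             else :
--                 continue
--     return out
-- ===== SOURCE B (Python) =====
-- def translater(inputSTR):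
--     out = []
--     for c in inputSTR:
--         if '0' <= c <= '9':
--             out.append(ord(c) - 48)
--         elif 'A' <= c <= 'Z':
--             out.append(ord(c) - 55)
--         elif 'a' <= c <= 'z':
--             out.append(ord(c) - 61)
--     return out
-- ===== Notes on version B (the rewrite author's own statement) =====
-- stated objective: faster
-- what changed: Replaces the built 62-entry (char,index) table and the nested membership scan per input character with a single pass computing each index directly by three ASCII range checks and code-point arithmetic.
import Mathlib
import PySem

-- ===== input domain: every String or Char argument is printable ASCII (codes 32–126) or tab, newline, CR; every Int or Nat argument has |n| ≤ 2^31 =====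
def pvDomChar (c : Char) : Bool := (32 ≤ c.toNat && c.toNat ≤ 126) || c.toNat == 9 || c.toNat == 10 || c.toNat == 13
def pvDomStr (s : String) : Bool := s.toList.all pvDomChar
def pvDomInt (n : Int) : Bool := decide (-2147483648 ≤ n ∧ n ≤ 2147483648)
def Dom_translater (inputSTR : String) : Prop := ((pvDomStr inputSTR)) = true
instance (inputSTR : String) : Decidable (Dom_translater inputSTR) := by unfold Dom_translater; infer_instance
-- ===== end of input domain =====

-- B replaces A's 62-entry (char,index) table and its inner membership scan by direct
-- code-point arithmetic guarded by three ASCII range checks (one pass, no table).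

-- ===== PORT A =====
-- index(): builds [(char, position)] pairs over the base-62 alphabet with a running counter j
def pvIndexTable : List (Char × Int) :=
  (("0123456789ABCDEFGHIJKLMNOPQRSTUVWXYZabcdefghijklmnopqrstuvwxyz".toList).foldl
    (fun (st : List (Char × Int) × Int) i => (st.1 ++ [(i, st.2)], st.2 + 1)) ([], 0)).1

-- 'i in j' on the tuple j = (char, int) with i a one-char string matches only the char component
def translater (inputSTR : String) : List Int :=
  inputSTR.toList.foldl
    (fun out i =>
      pvIndexTable.foldl (fun out j => if i = j.1 then out ++ [j.2] else out) out)
    []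

-- ===== PORT B =====
def translater_alt (inputSTR : String) : List Int :=
  inputSTR.toList.foldl
    (fun out c =>
      if '0' ≤ c ∧ c ≤ '9' then out ++ [((c.toNat : Int) - 48)]
      else if 'A' ≤ c ∧ c ≤ 'Z' then out ++ [((c.toNat : Int) - 55)]
      else if 'a' ≤ c ∧ c ≤ 'z' then out ++ [((c.toNat : Int) - 61)]
      else out)
    []

-- ===== PRECONDITION & SPEC =====
def Spec_translater (inputSTR : String) (out : List Int) : Prop := out = translater_alt inputSTR
instance (inputSTR : String) (out : List Int) : Decidable (Spec_translater inputSTR out) := by unfold Spec_translater; infer_instance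

-- ===== CLAIM (what is proved, stated in full; the proofs are below) =====
def Claim_equal_translater : Prop := ∀ (inputSTR : String), Dom_translater inputSTR → Spec_translater inputSTR (translater inputSTR)

-- ===== LEMMAS AND PROOFS =====

-- the per-character steps agree on every character of the admitted domain
theorem pv_step_eq (c : Char) (h : pvDomChar c = true) (out : List Int) :
    pvIndexTable.foldl (fun out j => if c = j.1 then out ++ [j.2] else out) out
      = (if '0' ≤ c ∧ c ≤ '9' then out ++ [((c.toNat : Int) - 48)]
         else if 'A' ≤ c ∧ c ≤ 'Z' then out ++ [((c.toNat : Int) - 55)]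
         else if 'a' ≤ c ∧ c ≤ 'z' then out ++ [((c.toNat : Int) - 61)]
         else out) := by
  have hstep : (fun (out : List Int) (j : Char × Int) => if c = j.1 then out ++ [j.2] else out)
      = (fun out j => if (fun (j : Char × Int) => decide (c = j.1)) j = true then out ++ [Prod.snd j] else out) := by
    funext out j; simp
  rw [hstep, PySem.List.foldl_append_if]
  have hc : c = Char.ofNat c.toNat := (Char.ofNat_toNat c).symm
  have hn : c.toNat ∈ (9 :: 10 :: 13 :: (List.range 95).map (· + 32)) := by
    simp only [pvDomChar, Bool.or_eq_true, Bool.and_eq_true, decide_eq_true_eq, beq_iff_eq] at h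
    simp only [List.mem_cons, List.mem_map, List.mem_range]
    rcases h with ((h | h) | h) | h
    · exact .inr (.inr (.inr ⟨c.toNat - 32, by omega, by omega⟩))
    · omega
    · omega
    · omega
  have htab : pvIndexTable = [('0', 0), ('1', 1), ('2', 2), ('3', 3), ('4', 4), ('5', 5), ('6', 6), ('7', 7), ('8', 8), ('9', 9), ('A', 10), ('B', 11), ('C', 12), ('D', 13), ('E', 14), ('F', 15), ('G', 16), ('H', 17), ('I', 18), ('J', 19), ('K', 20), ('L', 21), ('M', 22), ('N', 23), ('O', 24), ('P', 25), ('Q', 26), ('R', 27), ('S', 28), ('T', 29), ('U', 30), ('V', 31), ('W', 32), ('X', 33), ('Y', 34), ('Z', 35), ('a', 36), ('b', 37), ('c', 38), ('d', 39), ('e', 40), ('f', 41), ('g', 42), ('h', 43), ('i', 44), ('j', 45), ('k', 46), ('l', 47), ('m', 48), ('n', 49), ('o', 50), ('p', 51), ('q', 52), ('r', 53), ('s', 54), ('t', 55), ('u', 56), ('v', 57), ('w', 58), ('x', 59), ('y', 60), ('z', 61)] := by decide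
  rw [htab]
  have key : ∀ n ∈ (9 :: 10 :: 13 :: (List.range 95).map (· + 32)),
      ((([('0', 0), ('1', 1), ('2', 2), ('3', 3), ('4', 4), ('5', 5), ('6', 6), ('7', 7), ('8', 8), ('9', 9), ('A', 10), ('B', 11), ('C', 12), ('D', 13), ('E', 14), ('F', 15), ('G', 16), ('H', 17), ('I', 18), ('J', 19), ('K', 20), ('L', 21), ('M', 22), ('N', 23), ('O', 24), ('P', 25), ('Q', 26), ('R', 27), ('S', 28), ('T', 29), ('U', 30), ('V', 31), ('W', 32), ('X', 33), ('Y', 34), ('Z', 35), ('a', 36), ('b', 37), ('c', 38), ('d', 39), ('e', 40), ('f', 41), ('g', 42), ('h', 43), ('i', 44), ('j', 45), ('k', 46), ('l', 47), ('m', 48), ('n', 49), ('o', 50), ('p', 51), ('q', 52), ('r', 53), ('s', 54), ('t', 55), ('u', 56), ('v', 57), ('w', 58), ('x', 59), ('y', 60), ('z', 61)] : List (Char × Int)).filter (fun j => Char.ofNat n = j.1)).map Prod.snd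
        = (if '0' ≤ Char.ofNat n ∧ Char.ofNat n ≤ '9' then [(((Char.ofNat n).toNat : Int) - 48)]
           else if 'A' ≤ Char.ofNat n ∧ Char.ofNat n ≤ 'Z' then [(((Char.ofNat n).toNat : Int) - 55)]
           else if 'a' ≤ Char.ofNat n ∧ Char.ofNat n ≤ 'z' then [(((Char.ofNat n).toNat : Int) - 61)]
           else [])) := by decide
  have hkey := key c.toNat hn
  rw [← hc] at hkey
  rw [hkey]
  split_ifs <;> simp

-- ===== VERDICT (by name: the statement is the Claim_ definition above) =====
theorem translater_spec : Claim_equal_translater := by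
  intro s hdom
  unfold Spec_translater translater translater_alt
  apply PySem.List.foldl_congr_mem
  intro acc c hm
  have hc : pvDomChar c = true := by
    unfold Dom_translater pvDomStr at hdom
    exact (List.all_eq_true.mp hdom) c hm
  exact pv_step_eq c hc acc
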